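-- pv_equiv track=rewrite | github.com/romirmoza/advent-of-code-2019 | advent-of-code-2020/day17_conway_cubes.py | get_neighbor_list
-- ===== SOURCE A (Python) =====
-- def get_neighbor_list(node, active_cubes, neighbor):
--     dim = len(neighbor) - len(node)
--     neighbor_list = []
--
--     if not dim:
--         if neighbor != node:
--             neighbor_list.append(neighbor)
--         return neighbor_list
--
--     for d in range(-1, 2):
--         neighbor_list.extend(get_neighbor_list(node, active_cubes, neighbor + (node[dim]+d,)))
--     return neighbor_list
-- ===== SOURCE B (Python) =====
-- def get_neighbor_list(node, active_cubes, neighbor):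
--     k = len(node) - len(neighbor)
--     tail = node[len(neighbor):]
--     # iteratively build all offset tuples of length k over (-1, 0, 1), lex order
--     offset_tuples = [()]
--     for _ in range(k):
--         offset_tuples = [(d,) + t for d in (-1, 0, 1) for t in offset_tuples]
--     cands = [neighbor + tuple(c + o for c, o in zip(tail, offs)) for offs in offset_tuples]
--     return [cand for cand in cands if cand != node]
-- ===== Notes on version B (the rewrite author's own statement) =====
-- stated objective: alternative
-- what changed: Replaced A's recursion (which extends the neighbor prefix one coordinate per call) by an iterative enumeration: build all length-k offset tuples over (-1,0,1) in lex order, add each pairwise to the tail of node, and filter out node itself.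
import Mathlib
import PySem

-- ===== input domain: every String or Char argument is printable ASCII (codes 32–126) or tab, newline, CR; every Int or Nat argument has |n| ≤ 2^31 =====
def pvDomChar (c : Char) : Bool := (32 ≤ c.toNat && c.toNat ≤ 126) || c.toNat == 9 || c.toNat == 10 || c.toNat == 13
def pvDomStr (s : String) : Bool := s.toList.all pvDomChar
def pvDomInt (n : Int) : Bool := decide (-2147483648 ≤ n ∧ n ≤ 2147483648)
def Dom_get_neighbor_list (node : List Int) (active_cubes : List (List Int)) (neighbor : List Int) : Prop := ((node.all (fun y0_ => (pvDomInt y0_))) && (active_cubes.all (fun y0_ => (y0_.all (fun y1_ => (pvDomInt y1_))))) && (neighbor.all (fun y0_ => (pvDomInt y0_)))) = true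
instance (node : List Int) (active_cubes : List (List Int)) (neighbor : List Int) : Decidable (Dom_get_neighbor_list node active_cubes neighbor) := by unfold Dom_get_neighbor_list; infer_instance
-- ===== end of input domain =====

-- B replaces A's recursion by an iterative enumeration of all offset tuples; same cost, different structure.

-- ===== PORT A =====
def get_neighbor_list (node : List Int) (active_cubes : List (List Int)) (neighbor : List Int) : List (List Int) :=
  let dim : Int := (neighbor.length : Int) - (node.length : Int)
  if dim = 0 then
    if neighbor ≠ node then [neighbor] else []
  else
    match h : PySem.List.pyGet? node dim with
    | none => []   -- Python raises IndexError here (excluded by Pre_)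
    | some v =>
        ([-1, 0, 1] : List Int).foldl
          (fun acc d => acc ++ get_neighbor_list node active_cubes (neighbor ++ [v + d])) []
termination_by 2 * node.length - neighbor.length
decreasing_by
  have hin : ¬ PySem.List.pyGet? node dim = none := by simp [h]
  rw [PySem.List.pyGet?_eq_none_iff] at hin
  have : PySem.Raise.InRange node.length dim := not_not.mp hin
  unfold PySem.Raise.InRange at this
  simp only [List.length_append, List.length_cons, List.length_nil]
  omega

-- ===== PORT B =====
-- offset_tuples after k loop iterations
def pvOffsets : Nat → List (List Int)
  | 0 => [[]]
  | k + 1 => ([-1, 0, 1] : List Int).flatMap (fun d => (pvOffsets k).map (d :: ·))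

def get_neighbor_list_alt (node : List Int) (active_cubes : List (List Int)) (neighbor : List Int) : List (List Int) :=
  let k := node.length - neighbor.length
  let tail := node.drop neighbor.length
  let cands := (pvOffsets k).map (fun offs => neighbor ++ List.zipWith (· + ·) tail offs)
  cands.filter (· ≠ node)

-- ===== PRECONDITION & SPEC =====
-- Pre_ excludes exactly the inputs where A raises IndexError (neighbor longer than node).
def Pre_get_neighbor_list (node : List Int) (active_cubes : List (List Int)) (neighbor : List Int) : Prop :=
  neighbor.length ≤ node.length
instance (node : List Int) (active_cubes : List (List Int)) (neighbor : List Int) : Decidable (Pre_get_neighbor_list node active_cubes neighbor) := by unfold Pre_get_neighbor_list; infer_instance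

def pvWitness_get_neighbor_list : List Int × List (List Int) × List Int := ([0, 0], [[1, 1]], [])

def Spec_get_neighbor_list (node : List Int) (active_cubes : List (List Int)) (neighbor : List Int) (out : List (List Int)) : Prop := out = get_neighbor_list_alt node active_cubes neighbor
instance (node : List Int) (active_cubes : List (List Int)) (neighbor : List Int) (out : List (List Int)) : Decidable (Spec_get_neighbor_list node active_cubes neighbor out) := by unfold Spec_get_neighbor_list; infer_instance

-- ===== CLAIM (what is proved, stated in full; the proofs are below) =====
def Claim_equal_get_neighbor_list : Prop := ∀ (node : List Int) (active_cubes : List (List Int)) (neighbor : List Int), Dom_get_neighbor_list node active_cubes neighbor → Pre_get_neighbor_list node active_cubes neighbor → Spec_get_neighbor_list node active_cubes neighbor (get_neighbor_list node active_cubes neighbor)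

-- ===== LEMMAS AND PROOFS =====

lemma pv_alt_step (node : List Int) (acs : List (List Int)) (neighbor : List Int) (k : Nat)
    (hlen : neighbor.length + (k+1) = node.length) (hlt : neighbor.length < node.length) :
    get_neighbor_list_alt node acs neighbor =
      (get_neighbor_list_alt node acs (neighbor ++ [node[neighbor.length]'hlt + -1]) ++
       get_neighbor_list_alt node acs (neighbor ++ [node[neighbor.length]'hlt + 0])) ++
      get_neighbor_list_alt node acs (neighbor ++ [node[neighbor.length]'hlt + 1]) := by
  unfold get_neighbor_list_alt
  rw [show node.length - neighbor.length = k + 1 from by omega]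
  simp only [pvOffsets, List.flatMap_cons, List.flatMap_nil, List.map_append, List.map_map,
    List.filter_append, List.append_nil, List.length_append, List.length_cons, List.length_nil]
  have hfun : ∀ d : Int,
      ((fun offs => neighbor ++ List.zipWith (· + ·) (List.drop neighbor.length node) offs) ∘
        (fun x => d :: x)) =
      (fun offs : List Int => neighbor ++ [node[neighbor.length]'hlt + d] ++
        List.zipWith (· + ·) (List.drop (neighbor.length + 1) node) offs) := by
    intro d; funext offs
    simp only [Function.comp_apply]
    rw [List.drop_eq_getElem_cons hlt, List.zipWith_cons_cons, List.append_cons]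
  simp only [Nat.zero_add, hfun,
    show node.length - (neighbor.length + 1) = k from by omega, List.append_assoc]

lemma pv_main (node : List Int) (acs : List (List Int)) :
    ∀ (k : Nat) (neighbor : List Int), neighbor.length + k = node.length →
      get_neighbor_list node acs neighbor = get_neighbor_list_alt node acs neighbor := by
  intro k
  induction k with
  | zero =>
      intro neighbor hlen
      rw [get_neighbor_list]
      simp only [Nat.add_zero] at hlen
      have hdim : ((neighbor.length : Int) - (node.length : Int)) = 0 := by omega
      rw [if_pos hdim]
      unfold get_neighbor_list_alt
      have hk : node.length - neighbor.length = 0 := by omega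
      rw [hk]
      by_cases h : neighbor = node <;> simp [pvOffsets, h]
  | succ k ih =>
      intro neighbor hlen
      have hlt : neighbor.length < node.length := by omega
      have hdim : ((neighbor.length : Int) - (node.length : Int)) = -(((k+1 : Nat)) : Int) := by
        push_cast; omega
      have hv : PySem.List.pyGet? node ((neighbor.length : Int) - (node.length : Int))
          = some (node[neighbor.length]'hlt) := by
        rw [hdim, PySem.List.pyGet?_neg_natCast node (k+1) (by omega) (by omega)]
        rw [show node.length - (k+1) = neighbor.length by omega]
        simp [List.getElem?_eq_getElem hlt]
      rw [get_neighbor_list]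
      rw [if_neg (by omega)]
      have hlen3 : ∀ x : Int, (neighbor ++ [x]).length + k = node.length := by
        intro x; simp; omega
      split
      · rename_i heq; rw [hv] at heq; exact absurd heq (by simp)
      · rename_i v heq
        rw [hv] at heq; injection heq with hveq; subst hveq
        simp only [List.foldl, List.nil_append]
        rw [ih _ (hlen3 _), ih _ (hlen3 _), ih _ (hlen3 _)]
        exact (pv_alt_step node acs neighbor k (by omega) hlt).symm

-- ===== VERDICT (by name: the statement is the Claim_ definition above) =====
theorem get_neighbor_list_spec : Claim_equal_get_neighbor_list := by
  intro node acs neighbor _ hpre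
  unfold Spec_get_neighbor_list
  exact pv_main node acs (node.length - neighbor.length) neighbor (by unfold Pre_get_neighbor_list at hpre; omega)
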